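-- pv_equiv track=rewrite | github.com/yffbit/PolyominoSolver | untouchable11/untouchable11.py | change_form
-- ===== SOURCE A (Python) =====
-- def change_size(row, col):
--     return 2*row+2, 2*col+2
--
-- def change_form(shape, inner_idx):
--     """
--     原问题两个部件之间不能接触,为了能够接触,在每个部件的周围增加半格长度,扩充后的部件就可以接触了
--     为了使坐标都为整数,将一个格子看成2x2,也就是变成4个小格子,需要重新计算坐标
--            ******
--     ## --> *####*
--            *####*
--            ******
--     """
--     row, col = shape
--     new_idx = set()
--     for idx in inner_idx:
--         r, c = idx // col, idx % col#扩充前的坐标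
--         # 部件的每个格子周围都扩充半格长度,扩充后占4x4,也就是16格
--         # 部件中的相邻格子扩充后坐标有重复,通过集合去重
--         r, c = 2 * r, 2 * c
--         for i in range(r, r+4):
--             for j in range(c, c+4):
--                 new_idx.add((i,j))
--     row, col = change_size(row, col)
--     new_idx = sorted([i*col+j for i,j in new_idx])
--     return new_idx, (row, col)
-- ===== SOURCE B (Python) =====
-- def change_size(row, col):
--     return 2*row+2, 2*col+2
--
-- def change_form(shape, inner_idx):
--     row, col = shape
--     # expand every cell to its 16 sub-cells (duplicates included), then
--     # dedup by sorting the pairs and skipping adjacent repeats (no set)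
--     pts = [(2 * (idx // col) + di, 2 * (idx % col) + dj)
--            for idx in inner_idx for di in range(4) for dj in range(4)]
--     pts.sort()
--     new_row, new_col = change_size(row, col)
--     flat = []
--     prev = None
--     for p in pts:
--         if p != prev:
--             flat.append(p[0] * new_col + p[1])
--             prev = p
--     flat.sort()
--     return flat, (new_row, new_col)
-- ===== Notes on version B (the rewrite author's own statement) =====
-- stated objective: alternative
-- what changed: B removes the hash-set entirely: it materialises all 16 expanded sub-cells per index as a flat list of pairs, sorts that list, deduplicates by skipping adjacent equal pairs in a single pass, and sorts the flattened indices (dedup by sorting instead of hashing).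
import Mathlib
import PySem

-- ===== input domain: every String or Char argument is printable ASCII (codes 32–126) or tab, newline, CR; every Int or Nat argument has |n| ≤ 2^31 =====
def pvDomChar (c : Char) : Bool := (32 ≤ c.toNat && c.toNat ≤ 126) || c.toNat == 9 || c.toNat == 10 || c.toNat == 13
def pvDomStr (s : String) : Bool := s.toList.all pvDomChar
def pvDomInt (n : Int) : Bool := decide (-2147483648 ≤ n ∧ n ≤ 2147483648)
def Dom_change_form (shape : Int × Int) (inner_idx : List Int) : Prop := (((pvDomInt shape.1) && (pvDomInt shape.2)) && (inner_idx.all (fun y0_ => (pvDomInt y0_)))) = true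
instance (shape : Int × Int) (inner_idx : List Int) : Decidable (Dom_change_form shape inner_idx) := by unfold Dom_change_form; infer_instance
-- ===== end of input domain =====

-- B removes the hash-set: it lists all 16 expanded sub-cells per index (duplicates included),
-- sorts the pairs, skips adjacent repeats in one pass, and sorts the flattened indices
-- (dedup by sorting instead of hashing); alternative decomposition, similar cost.


-- ===== PORT A =====
-- sorted over the set's elements is order-independent (identity key on the mapped values),
-- so mapping over the PySem.Set's underlying list is exact here.
def change_form (shape : Int × Int) (inner_idx : List Int) : List Int × (Int × Int) :=
  let row := shape.1
  let col := shape.2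
  let new_idx : PySem.Set (Int × Int) :=
    inner_idx.foldl (fun s idx =>
      let r := PySem.Int.floordiv idx col
      let c := PySem.Int.mod idx col
      let r := 2 * r
      let c := 2 * c
      (PySem.List.pyRange r (r + 4) 1).foldl (fun s i =>
        (PySem.List.pyRange c (c + 4) 1).foldl (fun s j =>
          PySem.Set.add s (i, j)) s) s) PySem.Set.empty
  let row' := 2 * row + 2
  let col' := 2 * col + 2
  (PySem.List.sorted (new_idx.map (fun p => p.1 * col' + p.2)) (fun x => x) false,
   (row', col'))

-- ===== PORT B =====
def change_form_alt (shape : Int × Int) (inner_idx : List Int) : List Int × (Int × Int) :=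
  let row := shape.1
  let col := shape.2
  -- pts = [(2*(idx//col)+di, 2*(idx%col)+dj) for idx in inner_idx for di in range(4) for dj in range(4)]
  let pts : List (Int × Int) :=
    inner_idx.flatMap (fun idx =>
      (PySem.List.pyRange 0 4 1).flatMap (fun di =>
        (PySem.List.pyRange 0 4 1).map (fun dj =>
          (2 * PySem.Int.floordiv idx col + di, 2 * PySem.Int.mod idx col + dj))))
  -- pts.sort()  (Python tuple sort = lexicographic: sorted2 with the two components)
  let pts := PySem.List.sorted2 pts (fun p => p.1) (fun p => p.2) false
  let new_row := 2 * row + 2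
  let new_col := 2 * col + 2
  -- flat = []; prev = None; for p in pts: if p != prev: flat.append(...); prev = p
  let flat := (pts.foldl (fun (st : List Int × Option (Int × Int)) p =>
      if some p ≠ st.2 then (st.1 ++ [p.1 * new_col + p.2], some p) else st) ([], none)).1
  (PySem.List.sorted flat (fun x => x) false, (new_row, new_col))

-- ===== PRECONDITION & SPEC =====
-- Pre_ excludes exactly the inputs where Python A raises ZeroDivisionError (col = 0 with a
-- nonempty index list); B raises there too.
def Pre_change_form (shape : Int × Int) (inner_idx : List Int) : Prop :=
  shape.2 ≠ 0 ∨ inner_idx = []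
instance (shape : Int × Int) (inner_idx : List Int) : Decidable (Pre_change_form shape inner_idx) := by unfold Pre_change_form; infer_instance
def pvWitness_change_form : (Int × Int) × List Int := ((2, 3), [0, 1, 5])

def Spec_change_form (shape : Int × Int) (inner_idx : List Int) (out : List Int × (Int × Int)) : Prop := out = change_form_alt shape inner_idx
instance (shape : Int × Int) (inner_idx : List Int) (out : List Int × (Int × Int)) : Decidable (Spec_change_form shape inner_idx out) := by unfold Spec_change_form; infer_instance

-- ===== CLAIM (what is proved, stated in full; the proofs are below) =====
def Claim_equal_change_form : Prop := ∀ (shape : Int × Int) (inner_idx : List Int), Dom_change_form shape inner_idx → Pre_change_form shape inner_idx → Spec_change_form shape inner_idx (change_form shape inner_idx)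

-- ===== LEMMAS AND PROOFS =====

-- the strict lexicographic comparison sorted2 uses on pairs of Ints (proof-side name)
def pvLt (a b : Int × Int) : Bool :=
  decide (a.1 < b.1) || (!decide (b.1 < a.1) && decide (a.2 < b.2))

theorem pvLt_false_iff (a b : Int × Int) :
    pvLt b a = false ↔ (a.1 < b.1 ∨ (a.1 = b.1 ∧ a.2 ≤ b.2)) := by
  simp only [pvLt, Bool.or_eq_false_iff, Bool.and_eq_false_iff, Bool.not_eq_false',
    decide_eq_false_iff_not, decide_eq_true_eq, not_lt]
  omega

-- sorted2 on pairs of Ints is its defining fold of insertBy with pvLt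
theorem pv_sorted2_eq (xs : List (Int × Int)) :
    PySem.List.sorted2 xs (fun p => p.1) (fun p => p.2) false
      = xs.foldl (fun acc x => PySem.List.insertBy pvLt x acc) [] := rfl

theorem pv_pairwise_insertBy (x : Int × Int) (l : List (Int × Int))
    (h : l.Pairwise (fun a b => pvLt b a = false)) :
    (PySem.List.insertBy pvLt x l).Pairwise (fun a b => pvLt b a = false) := by
  induction l with
  | nil => simp [PySem.List.insertBy]
  | cons y ys ih =>
    rw [List.pairwise_cons] at h
    show (if pvLt x y = true then x :: y :: ys else y :: PySem.List.insertBy pvLt x ys).Pairwise _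
    split_ifs with hxy
    · refine List.Pairwise.cons ?_ (List.Pairwise.cons h.1 h.2)
      intro z hz
      rcases List.mem_cons.mp hz with rfl | hz
      · rw [pvLt_false_iff]
        have : ¬ pvLt x z = false := by simp [hxy]
        rw [pvLt_false_iff] at this
        omega
      · have hyz := (pvLt_false_iff _ _).mp (h.1 z hz)
        have : ¬ pvLt x y = false := by simp [hxy]
        rw [pvLt_false_iff] at this
        rw [pvLt_false_iff]
        omega
    · refine List.Pairwise.cons ?_ (ih h.2)
      intro z hz
      rcases (PySem.List.mem_insertBy pvLt x z ys).mp hz with rfl | hz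
      · simpa using hxy
      · exact h.1 z hz

theorem pv_pairwise_sorted2 (xs : List (Int × Int)) :
    (PySem.List.sorted2 xs (fun p => p.1) (fun p => p.2) false).Pairwise
      (fun a b => pvLt b a = false) := by
  rw [pv_sorted2_eq]
  have : ∀ (l : List (Int × Int)) (acc : List (Int × Int)),
      acc.Pairwise (fun a b => pvLt b a = false) →
      (l.foldl (fun acc x => PySem.List.insertBy pvLt x acc) acc).Pairwise
        (fun a b => pvLt b a = false) := by
    intro l
    induction l with
    | nil => intro acc h; exact h
    | cons x t ih => intro acc h; exact ih _ (pv_pairwise_insertBy x acc h)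
  exact this xs [] (by simp)

-- the adjacent-skip loop of B, as a recursive function (proof-side mirror of the foldl)
def pvDedup : Option (Int × Int) → List (Int × Int) → List (Int × Int)
  | _, [] => []
  | prev, p :: t => if some p = prev then pvDedup prev t else p :: pvDedup (some p) t

def pvPrevLe : Option (Int × Int) → Int × Int → Prop
  | none, _ => True
  | some q, z => pvLt z q = false

theorem pv_foldl_dedup (col' : Int) (l : List (Int × Int)) (acc : List Int)
    (prev : Option (Int × Int)) :
    (l.foldl (fun (st : List Int × Option (Int × Int)) p =>
        if some p ≠ st.2 then (st.1 ++ [p.1 * col' + p.2], some p) else st) (acc, prev)).1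
      = acc ++ (pvDedup prev l).map (fun p => p.1 * col' + p.2) := by
  induction l generalizing acc prev with
  | nil => simp [pvDedup]
  | cons p t ih =>
    rw [List.foldl_cons]
    by_cases h : some p = prev
    · have e : (if some p ≠ (acc, prev).2 then ((acc, prev).1 ++ [p.1 * col' + p.2], some p)
          else (acc, prev)) = (acc, prev) := by simp [h]
      rw [e, ih]
      simp only [pvDedup]
      rw [if_pos h]
    · have e : (if some p ≠ (acc, prev).2 then ((acc, prev).1 ++ [p.1 * col' + p.2], some p)
          else (acc, prev)) = (acc ++ [p.1 * col' + p.2], some p) := by simp [h]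
      rw [e, ih]
      simp only [pvDedup]
      rw [if_neg h]
      simp

theorem pv_mem_pvDedup (l : List (Int × Int)) (prev : Option (Int × Int)) (x : Int × Int)
    (hp : l.Pairwise (fun a b => pvLt b a = false)) (hprev : ∀ z ∈ l, pvPrevLe prev z) :
    x ∈ pvDedup prev l ↔ (x ∈ l ∧ some x ≠ prev) := by
  induction l generalizing prev with
  | nil => simp [pvDedup]
  | cons p t ih =>
    rw [List.pairwise_cons] at hp
    show x ∈ (if some p = prev then pvDedup prev t else p :: pvDedup (some p) t) ↔ _
    split_ifs with hpe
    · rw [ih prev hp.2 (fun z hz => hprev z (List.mem_cons_of_mem _ hz))]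
      constructor
      · rintro ⟨hx, hne⟩; exact ⟨List.mem_cons_of_mem _ hx, hne⟩
      · rintro ⟨hx, hne⟩
        rcases List.mem_cons.mp hx with rfl | hx
        · exact absurd hpe hne
        · exact ⟨hx, hne⟩
    · rw [List.mem_cons, ih (some p) hp.2 (fun z hz => hp.1 z hz)]
      constructor
      · rintro (rfl | ⟨hx, hne⟩)
        · exact ⟨List.mem_cons_self, hpe⟩
        · refine ⟨List.mem_cons_of_mem _ hx, ?_⟩
          -- x ∈ t, x ≠ p; prev ≤lex p ≤lex x and x = prev would force x = p
          rcases hprev p List.mem_cons_self with _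
          cases prev with
          | none => simp
          | some q =>
            intro hq
            rw [Option.some_inj] at hq
            subst hq
            have h1 := (pvLt_false_iff _ _).mp (hprev p List.mem_cons_self)
            have h2 := (pvLt_false_iff _ _).mp (hp.1 x hx)
            apply hne
            rw [Option.some_inj]
            have : x.1 = p.1 ∧ x.2 = p.2 := by omega
            exact Prod.ext this.1 this.2
      · rintro ⟨hx, hne⟩
        rcases List.mem_cons.mp hx with rfl | hx
        · exact Or.inl rfl
        · by_cases hxp : x = p
          · exact Or.inl hxp
          · exact Or.inr ⟨hx, by simpa using hxp⟩

theorem pv_nodup_pvDedup (l : List (Int × Int)) (prev : Option (Int × Int))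
    (hp : l.Pairwise (fun a b => pvLt b a = false)) (hprev : ∀ z ∈ l, pvPrevLe prev z) :
    (pvDedup prev l).Nodup := by
  induction l generalizing prev with
  | nil => simp [pvDedup]
  | cons p t ih =>
    rw [List.pairwise_cons] at hp
    show (if some p = prev then pvDedup prev t else p :: pvDedup (some p) t).Nodup
    split_ifs with hpe
    · exact ih prev hp.2 (fun z hz => hprev z (List.mem_cons_of_mem _ hz))
    · rw [List.nodup_cons]
      refine ⟨?_, ih (some p) hp.2 (fun z hz => hp.1 z hz)⟩
      intro hmem
      have := (pv_mem_pvDedup t (some p) p hp.2 (fun z hz => hp.1 z hz)).mp hmem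
      exact this.2 rfl

-- generic fold-preservation (used for Nodup of A's set)
theorem pv_foldl_pres {α β : Type} (f : α → β → α) (P : α → Prop)
    (h : ∀ s x, P s → P (f s x)) : ∀ (l : List β) (s : α), P s → P (l.foldl f s) := by
  intro l
  induction l with
  | nil => intro s hs; exact hs
  | cons x t ih => intro s hs; exact ih _ (h s x hs)

theorem pv_mem_double_fold {li lj : List Int} (s : PySem.Set (Int × Int)) (y : Int × Int) :
    y ∈ li.foldl (fun s i => lj.foldl (fun s j => PySem.Set.add s (i, j)) s) s ↔
      y ∈ s ∨ (y.1 ∈ li ∧ y.2 ∈ lj) := by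
  obtain ⟨y1, y2⟩ := y
  induction li generalizing s with
  | nil => simp
  | cons i t ih =>
    simp only [List.foldl_cons, ih, PySem.Set.mem_foldl_add (f := fun j => (i, j)),
      List.mem_cons, Prod.mk.injEq]
    constructor
    · rintro ((h | ⟨j, hj, rfl, rfl⟩) | h)
      · exact Or.inl h
      · exact Or.inr ⟨Or.inl rfl, hj⟩
      · exact Or.inr ⟨Or.inr h.1, h.2⟩
    · rintro (h | ⟨(rfl | hi), hj⟩)
      · exact Or.inl (Or.inl h)
      · exact Or.inl (Or.inr ⟨y2, hj, rfl, rfl⟩)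
      · exact Or.inr ⟨hi, hj⟩

-- membership in A's accumulated set
theorem pv_memS (col : Int) (l : List Int) (s : PySem.Set (Int × Int)) (y : Int × Int) :
    y ∈ l.foldl (fun s idx =>
        (PySem.List.pyRange (2 * PySem.Int.floordiv idx col) (2 * PySem.Int.floordiv idx col + 4) 1).foldl
          (fun s i =>
            (PySem.List.pyRange (2 * PySem.Int.mod idx col) (2 * PySem.Int.mod idx col + 4) 1).foldl
              (fun s j => PySem.Set.add s (i, j)) s) s) s ↔
      y ∈ s ∨ ∃ idx ∈ l,
        2 * PySem.Int.floordiv idx col ≤ y.1 ∧ y.1 < 2 * PySem.Int.floordiv idx col + 4 ∧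
        2 * PySem.Int.mod idx col ≤ y.2 ∧ y.2 < 2 * PySem.Int.mod idx col + 4 := by
  induction l generalizing s with
  | nil => simp
  | cons a t ih =>
    simp only [List.foldl_cons, ih, pv_mem_double_fold, PySem.List.mem_pyRange_one,
      List.mem_cons]
    constructor
    · rintro ((h | h) | ⟨idx, hidx, h⟩)
      · exact Or.inl h
      · exact Or.inr ⟨a, Or.inl rfl, by tauto⟩
      · exact Or.inr ⟨idx, Or.inr hidx, h⟩
    · rintro (h | ⟨idx, (rfl | hidx), h⟩)
      · exact Or.inl (Or.inl h)
      · exact Or.inl (Or.inr (by tauto))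
      · exact Or.inr ⟨idx, hidx, h⟩

theorem pv_nodup_S (col : Int) (l : List Int) (s : PySem.Set (Int × Int)) (hs : s.Nodup) :
    (l.foldl (fun s idx =>
        (PySem.List.pyRange (2 * PySem.Int.floordiv idx col) (2 * PySem.Int.floordiv idx col + 4) 1).foldl
          (fun s i =>
            (PySem.List.pyRange (2 * PySem.Int.mod idx col) (2 * PySem.Int.mod idx col + 4) 1).foldl
              (fun s j => PySem.Set.add s (i, j)) s) s) s).Nodup := by
  refine pv_foldl_pres _ (fun s => s.Nodup) (fun s idx hs => ?_) l s hs
  refine pv_foldl_pres _ (fun s => s.Nodup) (fun s i hs => ?_) _ s hs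
  exact pv_foldl_pres _ (fun s => s.Nodup) (fun s j hs => PySem.Set.nodup_add s _ hs) _ s hs

-- membership in B's raw point list
theorem pv_mem_pts (col : Int) (l : List Int) (y : Int × Int) :
    y ∈ l.flatMap (fun idx =>
        (PySem.List.pyRange 0 4 1).flatMap (fun di =>
          (PySem.List.pyRange 0 4 1).map (fun dj =>
            (2 * PySem.Int.floordiv idx col + di, 2 * PySem.Int.mod idx col + dj)))) ↔
      ∃ idx ∈ l,
        2 * PySem.Int.floordiv idx col ≤ y.1 ∧ y.1 < 2 * PySem.Int.floordiv idx col + 4 ∧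
        2 * PySem.Int.mod idx col ≤ y.2 ∧ y.2 < 2 * PySem.Int.mod idx col + 4 := by
  simp only [List.mem_flatMap, List.mem_map, PySem.List.mem_pyRange_one]
  constructor
  · rintro ⟨idx, hidx, di, hdi, dj, hdj, rfl⟩
    exact ⟨idx, hidx, by simp; omega⟩
  · rintro ⟨idx, hidx, h⟩
    refine ⟨idx, hidx, y.1 - 2 * PySem.Int.floordiv idx col, by omega,
      y.2 - 2 * PySem.Int.mod idx col, by omega, ?_⟩
    obtain ⟨y1, y2⟩ := y
    simp only [Prod.mk.injEq]
    omega

theorem pv_main (shape : Int × Int) (inner_idx : List Int) :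
    change_form shape inner_idx = change_form_alt shape inner_idx := by
  obtain ⟨row, col⟩ := shape
  simp only [change_form, change_form_alt]
  refine Prod.ext ?_ rfl
  set S := inner_idx.foldl (fun s idx =>
      (PySem.List.pyRange (2 * PySem.Int.floordiv idx col) (2 * PySem.Int.floordiv idx col + 4) 1).foldl
        (fun s i =>
          (PySem.List.pyRange (2 * PySem.Int.mod idx col) (2 * PySem.Int.mod idx col + 4) 1).foldl
            (fun s j => PySem.Set.add s (i, j)) s) s) PySem.Set.empty with hS
  set P := inner_idx.flatMap (fun idx =>
      (PySem.List.pyRange 0 4 1).flatMap (fun di =>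
        (PySem.List.pyRange 0 4 1).map (fun dj =>
          (2 * PySem.Int.floordiv idx col + di, 2 * PySem.Int.mod idx col + dj)))) with hP
  set Ps := PySem.List.sorted2 P (fun p => p.1) (fun p => p.2) false with hPs
  show PySem.List.sorted (S.map (fun p => p.1 * (2 * col + 2) + p.2)) (fun x => x) false
      = PySem.List.sorted ((Ps.foldl (fun (st : List Int × Option (Int × Int)) p =>
          if some p ≠ st.2 then (st.1 ++ [p.1 * (2 * col + 2) + p.2], some p) else st)
          ([], none)).1) (fun x => x) false
  rw [pv_foldl_dedup (2 * col + 2) Ps [] none, List.nil_append]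
  have hpw : Ps.Pairwise (fun a b => pvLt b a = false) := pv_pairwise_sorted2 P
  have hprev : ∀ z ∈ Ps, pvPrevLe none z := fun _ _ => trivial
  have hSnd : S.Nodup := by
    rw [hS]; exact pv_nodup_S col inner_idx _ (by simp [PySem.Set.empty])
  have hQnd : (pvDedup none Ps).Nodup := pv_nodup_pvDedup Ps none hpw hprev
  have hperm : S.Perm (pvDedup none Ps) := by
    rw [List.perm_ext_iff_of_nodup hSnd hQnd]
    intro y
    rw [pv_mem_pvDedup Ps none y hpw hprev]
    have hps : y ∈ Ps ↔ y ∈ P := (PySem.List.sorted2_perm P _ _ false).mem_iff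
    rw [hS, pv_memS, hps, hP, pv_mem_pts]
    simp [PySem.Set.empty]
  exact PySem.List.sorted_eq_sorted_of_perm _ _ _ (fun a b h => h) (hperm.map _)

-- ===== VERDICT (by name: the statement is the Claim_ definition above) =====
theorem change_form_spec : Claim_equal_change_form := by
  intro shape inner_idx _ _
  show change_form shape inner_idx = change_form_alt shape inner_idx
  exact pv_main shape inner_idx
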